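-- pv_equiv track=rewrite | github.com/urbanlutz/BAIT | figures/fig_utils.py | transform_algos
-- ===== SOURCE A (Python) =====
-- def transform_algos(s):
--     nice_names = {
--             "snip": "SNIP",
--             "synflow": "SynFlow",
--             "mag": "Magnitude",
--             "grasp": "GraSP",
--             "rand": "Random"
--     }
--     for k, v in nice_names.items():
--         s = s.replace(k, v)
--     return s
-- ===== SOURCE B (Python) =====
-- def transform_algos(s):
--     names = (("snip", "SNIP"), ("synflow", "SynFlow"), ("mag", "Magnitude"),
--              ("grasp", "GraSP"), ("rand", "Random"))
--     out = []
--     i = 0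
--     n = len(s)
--     while i < n:
--         for k, v in names:
--             if s.startswith(k, i):
--                 out.append(v)
--                 i += len(k)
--                 break
--         else:
--             out.append(s[i])
--             i += 1
--     return "".join(out)
-- ===== Notes on version B (the rewrite author's own statement) =====
-- stated objective: alternative
-- what changed: Replaced five sequential whole-string str.replace passes by a single left-to-right scan that tries the five abbreviations at each position and emits the display name of the first match, advancing past it.
import Mathlib
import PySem

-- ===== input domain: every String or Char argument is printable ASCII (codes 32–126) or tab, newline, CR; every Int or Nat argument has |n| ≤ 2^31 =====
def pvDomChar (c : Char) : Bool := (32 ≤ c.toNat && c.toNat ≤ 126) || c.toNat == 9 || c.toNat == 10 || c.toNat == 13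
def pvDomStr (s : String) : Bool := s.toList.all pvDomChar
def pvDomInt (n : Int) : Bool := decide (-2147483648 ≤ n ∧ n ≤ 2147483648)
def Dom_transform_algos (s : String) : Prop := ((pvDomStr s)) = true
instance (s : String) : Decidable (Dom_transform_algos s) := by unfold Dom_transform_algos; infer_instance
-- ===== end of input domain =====

-- B replaces A's five sequential whole-string replace passes by one left-to-right scan; alternative algorithm, same result.

-- ===== PORT A =====
def transform_algos (s : String) : String :=
  let s1 := PySem.Str.replace s "snip" "SNIP"
  let s2 := PySem.Str.replace s1 "synflow" "SynFlow"
  let s3 := PySem.Str.replace s2 "mag" "Magnitude"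
  let s4 := PySem.Str.replace s3 "grasp" "GraSP"
  PySem.Str.replace s4 "rand" "Random"

-- ===== PORT B =====
-- B's while loop: at each position try the five keys in dict order (s.startswith(k, i)); on a match
-- emit the display name and jump past the key, otherwise emit the character and advance by one.
def scanGo : List Char → List Char
  | [] => []
  | c :: t =>
    if List.isPrefixOf "snip".toList (c :: t) then "SNIP".toList ++ scanGo (List.drop 4 (c :: t))
    else if List.isPrefixOf "synflow".toList (c :: t) then "SynFlow".toList ++ scanGo (List.drop 7 (c :: t))
    else if List.isPrefixOf "mag".toList (c :: t) then "Magnitude".toList ++ scanGo (List.drop 3 (c :: t))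
    else if List.isPrefixOf "grasp".toList (c :: t) then "GraSP".toList ++ scanGo (List.drop 5 (c :: t))
    else if List.isPrefixOf "rand".toList (c :: t) then "Random".toList ++ scanGo (List.drop 4 (c :: t))
    else c :: scanGo t
termination_by l => l.length
decreasing_by all_goals (simp [List.length_drop]; try omega)

def transform_algos_alt (s : String) : String := String.ofList (scanGo s.toList)

-- ===== PRECONDITION & SPEC =====
def Spec_transform_algos (s : String) (out : String) : Prop := out = transform_algos_alt s
instance (s : String) (out : String) : Decidable (Spec_transform_algos s out) := by unfold Spec_transform_algos; infer_instance

-- ===== CLAIM (what is proved, stated in full; the proofs are below) =====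
def Claim_equal_transform_algos : Prop := ∀ (s : String), Dom_transform_algos s → Spec_transform_algos s (transform_algos s)

-- ===== LEMMAS AND PROOFS =====

-- the five keys and display names as character lists
def kSnip : List Char := ['s','n','i','p']
def vSnip : List Char := ['S','N','I','P']
def kSyn : List Char := ['s','y','n','f','l','o','w']
def vSyn : List Char := ['S','y','n','F','l','o','w']
def kMag : List Char := ['m','a','g']
def vMag : List Char := ['M','a','g','n','i','t','u','d','e']
def kGrasp : List Char := ['g','r','a','s','p']
def vGrasp : List Char := ['G','r','a','S','P']
def kRand : List Char := ['r','a','n','d']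
def vRand : List Char := ['R','a','n','d','o','m']

-- structural-recursion form of Python's str.replace for a nonempty pattern
def repL (old new : List Char) : List Char → List Char
  | [] => []
  | c :: t =>
    if old ≠ [] ∧ old <+: (c :: t) then new ++ repL old new (List.drop old.length (c :: t))
    else c :: repL old new t
termination_by l => l.length
decreasing_by
  · rename_i h; simp [List.length_drop]
    rcases h with ⟨h1, -⟩
    have : 0 < old.length := List.length_pos_iff.mpr h1
    omega
  · simp

theorem repL_nil (old new : List Char) : repL old new [] = [] := by simp [repL]

theorem go_eq_repL (old new : List Char) (hold : old ≠ []) :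
    ∀ (fuel : Nat) (l acc : List Char), l.length ≤ fuel →
      PySem.Chars.replace.go old new fuel l acc = acc.reverse ++ repL old new l := by
  intro fuel
  induction fuel with
  | zero =>
    intro l acc hl
    have : l = [] := List.length_eq_zero_iff.mp (Nat.le_zero.mp hl)
    subst this
    simp [PySem.Chars.replace.go, repL_nil]
  | succ n ih =>
    intro l acc hl
    cases l with
    | nil => simp [PySem.Chars.replace.go, repL_nil]
    | cons c t =>
      rw [PySem.Chars.replace.go]
      by_cases hp : old <+: (c :: t)
      · have hpb : old.isPrefixOf (c :: t) = true := by
          simpa [List.isPrefixOf_iff_prefix] using hp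
        rw [if_pos hpb]
        have hlen : (List.drop old.length (c :: t)).length ≤ n := by
          have : 0 < old.length := List.length_pos_iff.mpr hold
          simp only [List.length_drop, List.length_cons] at *
          omega
        rw [ih _ _ hlen]
        rw [repL, if_pos ⟨hold, hp⟩]
        simp
      · have hpb : ¬ (old.isPrefixOf (c :: t) = true) := by
          simpa [List.isPrefixOf_iff_prefix] using hp
        rw [if_neg hpb]
        have hlen : t.length ≤ n := by simpa using Nat.succ_le_succ_iff.mp hl
        rw [ih _ _ hlen]
        rw [repL, if_neg (by tauto)]
        simp

theorem replace_eq_repL (old new l : List Char) (hold : old ≠ []) :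
    PySem.Chars.replace l old new = repL old new l := by
  rw [PySem.Chars.replace]
  rw [if_neg (by simpa [List.isEmpty_iff] using hold)]
  simpa using go_eq_repL old new hold l.length l [] (le_refl _)

-- `p` neither contains a match of `old` nor can a match start in `p` and reach past its end
def noCross (old p : List Char) : Bool :=
  p.tails.all (fun u => u.isEmpty || (!old.isPrefixOf u && !u.isPrefixOf old))

theorem repL_append (old new p : List Char) (h : noCross old p = true) :
    ∀ t, repL old new (p ++ t) = p ++ repL old new t := by
  induction p with
  | nil => intro t; simp
  | cons c p' ih =>
    intro t
    have hcp := List.all_eq_true.mp h (c :: p') (by simp)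
    obtain ⟨ha, hb⟩ : old.isPrefixOf (c :: p') = false ∧ (c :: p').isPrefixOf old = false := by
      simpa using hcp
    have hne : ¬ old <+: (c :: p') ∧ ¬ (c :: p') <+: old := by
      constructor <;> rw [← List.isPrefixOf_iff_prefix] <;> simp [ha, hb]
    have hnm : ¬ (old ≠ [] ∧ old <+: (c :: (p' ++ t))) := by
      rintro ⟨h1, h2⟩
      have h2' : old <+: (c :: p') ++ t := by simpa using h2
      have hpref : (c :: p') <+: (c :: p') ++ t := List.prefix_append _ _
      by_cases hlen : old.length ≤ (c :: p').length
      · exact hne.1 (List.prefix_of_prefix_length_le h2' hpref hlen)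
      · exact hne.2 (List.prefix_of_prefix_length_le hpref h2' (by omega))
    have htail : noCross old p' = true := by
      apply List.all_eq_true.mpr
      intro u hu
      have hmem : u ∈ (c :: p').tails := by
        rw [List.tails_cons]; exact List.mem_cons_of_mem _ hu
      exact List.all_eq_true.mp h u hmem
    rw [show (c :: p') ++ t = c :: (p' ++ t) from rfl, repL, if_neg hnm]
    rw [ih htail]
    simp

theorem repL_front (old new t : List Char) (hold : old ≠ []) :
    repL old new (old ++ t) = new ++ repL old new t := by
  obtain ⟨c, o', hcons⟩ := List.exists_cons_of_ne_nil hold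
  subst hcons
  rw [List.cons_append, repL]
  rw [if_pos ⟨by simp, by simp [List.prefix_append]⟩]
  congr 2
  simp

-- no-match step: a non-matching head commutes out
theorem repL_cons_nomatch (old new : List Char) (c : Char) (t : List Char)
    (h : ¬ old <+: (c :: t)) : repL old new (c :: t) = c :: repL old new t := by
  rw [repL, if_neg (by tauto)]

-- ¬ k <+: l survives a replace pass whose replacement's first character occurs nowhere in k
theorem repL_preserves_noprefix (old v : List Char) (hd : Char) (hhd : v.head? = some hd) :
    ∀ (l k : List Char), k ≠ [] → hd ∉ k → ¬ k <+: l → ¬ k <+: repL old v l := by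
  intro l
  induction l with
  | nil =>
    intro k hk _ _ hc
    rw [repL_nil] at hc
    exact hk (List.prefix_nil.mp hc)
  | cons c t ih =>
    intro k hk hn hnp hc
    by_cases hm : old ≠ [] ∧ old <+: (c :: t)
    · rw [repL, if_pos hm] at hc
      cases v with
      | nil => simp at hhd
      | cons v0 vr =>
        obtain ⟨k0, k', rfl⟩ := List.exists_cons_of_ne_nil hk
        rw [List.cons_append] at hc
        have h0 : k0 = v0 := (List.cons_prefix_cons.mp hc).1
        have hv0 : hd = v0 := by simpa using hhd.symm
        exact hn (by simp [h0, ← hv0])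
    · rw [repL, if_neg hm] at hc
      obtain ⟨k0, k', rfl⟩ := List.exists_cons_of_ne_nil hk
      obtain ⟨hk0, hk'⟩ := List.cons_prefix_cons.mp hc
      by_cases hk'e : k' = []
      · subst hk'e; subst hk0
        exact hnp (by simp)
      · have hnt : ¬ k' <+: t := fun hp => hnp (by subst hk0; exact List.cons_prefix_cons.mpr ⟨rfl, hp⟩)
        exact ih k' hk'e (fun hmem => hn (List.mem_cons_of_mem _ hmem)) hnt hk'

-- A's five passes, on character lists
def chainL (l : List Char) : List Char :=
  repL kRand vRand (repL kGrasp vGrasp (repL kMag vMag (repL kSyn vSyn (repL kSnip vSnip l))))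

theorem chain_nil : chainL [] = [] := by simp [chainL, repL_nil]

theorem chain_snip (t : List Char) : chainL (kSnip ++ t) = vSnip ++ chainL t := by
  simp only [chainL]
  rw [repL_front _ _ _ (by decide : kSnip ≠ [])]
  rw [repL_append kSyn vSyn vSnip (by decide)]
  rw [repL_append kMag vMag vSnip (by decide)]
  rw [repL_append kGrasp vGrasp vSnip (by decide)]
  rw [repL_append kRand vRand vSnip (by decide)]

theorem chain_syn (t : List Char) : chainL (kSyn ++ t) = vSyn ++ chainL t := by
  simp only [chainL]
  rw [repL_append kSnip vSnip kSyn (by decide)]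
  rw [repL_front _ _ _ (by decide : kSyn ≠ [])]
  rw [repL_append kMag vMag vSyn (by decide)]
  rw [repL_append kGrasp vGrasp vSyn (by decide)]
  rw [repL_append kRand vRand vSyn (by decide)]

theorem chain_mag (t : List Char) : chainL (kMag ++ t) = vMag ++ chainL t := by
  simp only [chainL]
  rw [repL_append kSnip vSnip kMag (by decide)]
  rw [repL_append kSyn vSyn kMag (by decide)]
  rw [repL_front _ _ _ (by decide : kMag ≠ [])]
  rw [repL_append kGrasp vGrasp vMag (by decide)]
  rw [repL_append kRand vRand vMag (by decide)]

theorem chain_grasp (t : List Char) : chainL (kGrasp ++ t) = vGrasp ++ chainL t := by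
  simp only [chainL]
  rw [repL_append kSnip vSnip kGrasp (by decide)]
  rw [repL_append kSyn vSyn kGrasp (by decide)]
  rw [repL_append kMag vMag kGrasp (by decide)]
  rw [repL_front _ _ _ (by decide : kGrasp ≠ [])]
  rw [repL_append kRand vRand vGrasp (by decide)]

theorem chain_rand (t : List Char) : chainL (kRand ++ t) = vRand ++ chainL t := by
  simp only [chainL]
  rw [repL_append kSnip vSnip kRand (by decide)]
  rw [repL_append kSyn vSyn kRand (by decide)]
  rw [repL_append kMag vMag kRand (by decide)]
  rw [repL_append kGrasp vGrasp kRand (by decide)]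
  rw [repL_front _ _ _ (by decide : kRand ≠ [])]

theorem chain_cons (c : Char) (t : List Char)
    (h1 : ¬ kSnip <+: (c :: t)) (h2 : ¬ kSyn <+: (c :: t)) (h3 : ¬ kMag <+: (c :: t))
    (h4 : ¬ kGrasp <+: (c :: t)) (h5 : ¬ kRand <+: (c :: t)) :
    chainL (c :: t) = c :: chainL t := by
  simp only [chainL]
  have r1 : repL kSnip vSnip (c :: t) = c :: repL kSnip vSnip t := repL_cons_nomatch _ _ _ _ h1
  have p2 : ¬ kSyn <+: repL kSnip vSnip (c :: t) :=
    repL_preserves_noprefix kSnip vSnip 'S' rfl _ kSyn (by decide) (by decide) h2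
  rw [r1] at p2
  have p3 : ¬ kMag <+: repL kSyn vSyn (repL kSnip vSnip (c :: t)) :=
    repL_preserves_noprefix kSyn vSyn 'S' rfl _ kMag (by decide) (by decide)
      (repL_preserves_noprefix kSnip vSnip 'S' rfl _ kMag (by decide) (by decide) h3)
  have p4 : ¬ kGrasp <+: repL kMag vMag (repL kSyn vSyn (repL kSnip vSnip (c :: t))) :=
    repL_preserves_noprefix kMag vMag 'M' rfl _ kGrasp (by decide) (by decide)
      (repL_preserves_noprefix kSyn vSyn 'S' rfl _ kGrasp (by decide) (by decide)
        (repL_preserves_noprefix kSnip vSnip 'S' rfl _ kGrasp (by decide) (by decide) h4))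
  rw [r1] at p3 p4 ⊢
  have r2 : repL kSyn vSyn (c :: repL kSnip vSnip t) = c :: repL kSyn vSyn (repL kSnip vSnip t) :=
    repL_cons_nomatch _ _ _ _ p2
  rw [r2] at p3 p4 ⊢
  have r3 : repL kMag vMag (c :: repL kSyn vSyn (repL kSnip vSnip t))
      = c :: repL kMag vMag (repL kSyn vSyn (repL kSnip vSnip t)) := repL_cons_nomatch _ _ _ _ p3
  rw [r3] at p4 ⊢
  have r4 : repL kGrasp vGrasp (c :: repL kMag vMag (repL kSyn vSyn (repL kSnip vSnip t)))
      = c :: repL kGrasp vGrasp (repL kMag vMag (repL kSyn vSyn (repL kSnip vSnip t))) :=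
    repL_cons_nomatch _ _ _ _ p4
  rw [r4]
  have p5 : ¬ kRand <+: repL kGrasp vGrasp (repL kMag vMag (repL kSyn vSyn (repL kSnip vSnip (c :: t)))) :=
    repL_preserves_noprefix kGrasp vGrasp 'G' rfl _ kRand (by decide) (by decide)
      (repL_preserves_noprefix kMag vMag 'M' rfl _ kRand (by decide) (by decide)
        (repL_preserves_noprefix kSyn vSyn 'S' rfl _ kRand (by decide) (by decide)
          (repL_preserves_noprefix kSnip vSnip 'S' rfl _ kRand (by decide) (by decide) h5)))
  rw [r1, r2, r3, r4] at p5
  exact repL_cons_nomatch _ _ _ _ p5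

theorem scan_nil : scanGo [] = [] := by simp [scanGo]

theorem scan_snip (t : List Char) : scanGo (kSnip ++ t) = vSnip ++ scanGo t := by
  simp only [kSnip, vSnip, List.cons_append, List.nil_append]
  rw [scanGo]
  simp [List.isPrefixOf]

theorem scan_syn (t : List Char) : scanGo (kSyn ++ t) = vSyn ++ scanGo t := by
  simp only [kSyn, vSyn, List.cons_append, List.nil_append]
  rw [scanGo]
  simp [List.isPrefixOf]

theorem scan_mag (t : List Char) : scanGo (kMag ++ t) = vMag ++ scanGo t := by
  simp only [kMag, vMag, List.cons_append, List.nil_append]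
  rw [scanGo]
  simp [List.isPrefixOf]

theorem scan_grasp (t : List Char) : scanGo (kGrasp ++ t) = vGrasp ++ scanGo t := by
  simp only [kGrasp, vGrasp, List.cons_append, List.nil_append]
  rw [scanGo]
  simp [List.isPrefixOf]

theorem scan_rand (t : List Char) : scanGo (kRand ++ t) = vRand ++ scanGo t := by
  simp only [kRand, vRand, List.cons_append, List.nil_append]
  rw [scanGo]
  simp [List.isPrefixOf]

theorem scan_cons (c : Char) (t : List Char)
    (h1 : ¬ kSnip <+: (c :: t)) (h2 : ¬ kSyn <+: (c :: t)) (h3 : ¬ kMag <+: (c :: t))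
    (h4 : ¬ kGrasp <+: (c :: t)) (h5 : ¬ kRand <+: (c :: t)) :
    scanGo (c :: t) = c :: scanGo t := by
  have b1 : ¬ (List.isPrefixOf "snip".toList (c :: t) = true) := by
    simp only [List.isPrefixOf_iff_prefix]; simpa [kSnip] using h1
  have b2 : ¬ (List.isPrefixOf "synflow".toList (c :: t) = true) := by
    simp only [List.isPrefixOf_iff_prefix]; simpa [kSyn] using h2
  have b3 : ¬ (List.isPrefixOf "mag".toList (c :: t) = true) := by
    simp only [List.isPrefixOf_iff_prefix]; simpa [kMag] using h3
  have b4 : ¬ (List.isPrefixOf "grasp".toList (c :: t) = true) := by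
    simp only [List.isPrefixOf_iff_prefix]; simpa [kGrasp] using h4
  have b5 : ¬ (List.isPrefixOf "rand".toList (c :: t) = true) := by
    simp only [List.isPrefixOf_iff_prefix]; simpa [kRand] using h5
  rw [scanGo, if_neg b1, if_neg b2, if_neg b3, if_neg b4, if_neg b5]

theorem chain_eq_scan : ∀ (n : Nat) (l : List Char), l.length ≤ n → chainL l = scanGo l := by
  intro n
  induction n with
  | zero =>
    intro l hl
    have : l = [] := List.length_eq_zero_iff.mp (Nat.le_zero.mp hl)
    subst this
    rw [chain_nil, scan_nil]
  | succ n ih =>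
    intro l hl
    by_cases h1 : kSnip <+: l
    · obtain ⟨t, rfl⟩ := h1
      have ht : t.length ≤ n := by simp [kSnip] at hl; omega
      rw [scan_snip, chain_snip, ih t ht]
    · by_cases h2 : kSyn <+: l
      · obtain ⟨t, rfl⟩ := h2
        have ht : t.length ≤ n := by simp [kSyn] at hl; omega
        rw [scan_syn, chain_syn, ih t ht]
      · by_cases h3 : kMag <+: l
        · obtain ⟨t, rfl⟩ := h3
          have ht : t.length ≤ n := by simp [kMag] at hl; omega
          rw [scan_mag, chain_mag, ih t ht]
        · by_cases h4 : kGrasp <+: l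
          · obtain ⟨t, rfl⟩ := h4
            have ht : t.length ≤ n := by simp [kGrasp] at hl; omega
            rw [scan_grasp, chain_grasp, ih t ht]
          · by_cases h5 : kRand <+: l
            · obtain ⟨t, rfl⟩ := h5
              have ht : t.length ≤ n := by simp [kRand] at hl; omega
              rw [scan_rand, chain_rand, ih t ht]
            · cases l with
              | nil => rw [chain_nil, scan_nil]
              | cons c t =>
                have ht : t.length ≤ n := by simpa using hl
                rw [scan_cons c t h1 h2 h3 h4 h5, chain_cons c t h1 h2 h3 h4 h5, ih t ht]

theorem toList_transform (s : String) : (transform_algos s).toList = chainL s.toList := by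
  have es1 : "snip".toList = kSnip := by simp [kSnip]
  have es2 : "SNIP".toList = vSnip := by simp [vSnip]
  have es3 : "synflow".toList = kSyn := by simp [kSyn]
  have es4 : "SynFlow".toList = vSyn := by simp [vSyn]
  have es5 : "mag".toList = kMag := by simp [kMag]
  have es6 : "Magnitude".toList = vMag := by simp [vMag]
  have es7 : "grasp".toList = kGrasp := by simp [kGrasp]
  have es8 : "GraSP".toList = vGrasp := by simp [vGrasp]
  have es9 : "rand".toList = kRand := by simp [kRand]
  have es10 : "Random".toList = vRand := by simp [vRand]
  simp only [transform_algos, PySem.Str.toList_replace]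
  simp only [es1, es2, es3, es4, es5, es6, es7, es8, es9, es10]
  rw [replace_eq_repL kSnip vSnip _ (by decide)]
  rw [replace_eq_repL kSyn vSyn _ (by decide)]
  rw [replace_eq_repL kMag vMag _ (by decide)]
  rw [replace_eq_repL kGrasp vGrasp _ (by decide)]
  rw [replace_eq_repL kRand vRand _ (by decide)]
  rfl

theorem transform_eq (s : String) : transform_algos s = transform_algos_alt s := by
  have h1 : String.ofList ((transform_algos s).toList) = transform_algos s :=
    String.ofList_toList
  rw [← h1, toList_transform, chain_eq_scan s.toList.length s.toList le_rfl]
  rfl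

-- ===== VERDICT (by name: the statement is the Claim_ definition above) =====
theorem transform_algos_spec : Claim_equal_transform_algos := by
  intro s _
  exact transform_eq s
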